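-- pv_equiv track=rewrite | github.com/kennermatt-ucd/CSCI-4407-lab2 | scripts/brute_force.py | get_PlainTextScore
-- ===== SOURCE A (Python) =====
-- def get_PlainTextScore(data):
--     """
--     Calculates a score for a byte string based on character frequency.
--     Higher score = more likely to be plain text.
--     """
--     Score = 0
--     #ASCII range: space (32) to tilde (126)
--     #Whitespace: tab (9), newline (10), carriage return (13)
--
--     for byte in data:
--         #Checks if our byte is printable or common whitespace
--         if (32 <= byte <= 126) or byte in [9, 10, 13]:
--             Score += 1
--
--         #Characters that don't often appear in text (Something like null bytes) will negatively increment the score to filter the data.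
--         elif byte < 32 or byte > 126:
--             Score -= 1
--
--     return Score
-- ===== SOURCE B (Python) =====
-- def get_PlainTextScore(data):
--     """Two-stage: build a byte-value histogram, then weight each DISTINCT value once."""
--     freq = {}
--     for b in data:
--         freq[b] = freq.get(b, 0) + 1
--     score = 0
--     for value, count in freq.items():
--         if 32 <= value <= 126 or value in (9, 10, 13):
--             score += count
--         else:
--             score -= count
--     return score
-- ===== Notes on version B (the rewrite author's own statement) =====
-- stated objective: alternative
-- what changed: Replaces A's single pass of per-byte +/-1 accumulation by a two-stage grouped computation: first build a frequency dictionary of byte values, then classify each distinct value once and add/subtract its whole count (classification runs once per distinct value instead of once per byte; the redundant elif disappears since every byte is either text or non-text).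
import Mathlib
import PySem

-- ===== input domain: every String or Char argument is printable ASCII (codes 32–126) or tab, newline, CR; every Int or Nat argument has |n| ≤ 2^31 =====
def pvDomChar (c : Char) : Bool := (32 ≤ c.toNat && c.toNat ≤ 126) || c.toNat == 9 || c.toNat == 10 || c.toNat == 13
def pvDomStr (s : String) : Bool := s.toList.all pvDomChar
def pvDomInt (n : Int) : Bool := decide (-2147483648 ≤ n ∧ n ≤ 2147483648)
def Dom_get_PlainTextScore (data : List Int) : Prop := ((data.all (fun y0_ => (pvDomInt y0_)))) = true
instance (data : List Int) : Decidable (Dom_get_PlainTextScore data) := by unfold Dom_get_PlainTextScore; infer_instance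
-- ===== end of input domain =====

-- B replaces A's per-byte ±1 single-pass accumulator with a two-stage grouped computation: a frequency dictionary over byte values, then one ±count contribution per distinct value (alternative decomposition, same result since grouping a sum by value preserves it).


-- ===== PORT A =====
def get_PlainTextScore (data : List Int) : Int :=
  data.foldl (fun score byte =>
    if (32 ≤ byte ∧ byte ≤ 126) ∨ byte ∈ [(9:Int), 10, 13] then score + 1
    else if byte < 32 ∨ byte > 126 then score - 1
    else score) 0

-- ===== PORT B =====
def get_PlainTextScore_alt (data : List Int) : Int :=
  let freq := data.foldl (fun d b => d.insert b (d.getD b 0 + 1)) PySem.Dict.empty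
  freq.items.foldl (fun score vc =>
    if (32 ≤ vc.1 ∧ vc.1 ≤ 126) ∨ vc.1 = 9 ∨ vc.1 = 10 ∨ vc.1 = 13 then score + vc.2
    else score - vc.2) 0

-- ===== PRECONDITION & SPEC =====
def Spec_get_PlainTextScore (data : List Int) (out : Int) : Prop := out = get_PlainTextScore_alt data
instance (data : List Int) (out : Int) : Decidable (Spec_get_PlainTextScore data out) := by unfold Spec_get_PlainTextScore; infer_instance

-- ===== CLAIM (what is proved, stated in full; the proofs are below) =====
def Claim_equal_get_PlainTextScore : Prop := ∀ (data : List Int), Dom_get_PlainTextScore data → Spec_get_PlainTextScore data (get_PlainTextScore data)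

-- ===== LEMMAS AND PROOFS =====

-- the ±1 weight of a single byte
def pvWeight (b : Int) : Int :=
  if (32 ≤ b ∧ b ≤ 126) ∨ b = 9 ∨ b = 10 ∨ b = 13 then 1 else -1

lemma scoreA_acc (data : List Int) (s : Int) :
    data.foldl (fun score byte =>
      if (32 ≤ byte ∧ byte ≤ 126) ∨ byte ∈ [(9:Int), 10, 13] then score + 1
      else if byte < 32 ∨ byte > 126 then score - 1
      else score) s
    = s + (data.map pvWeight).sum := by
  induction data generalizing s with
  | nil => simp
  | cons b t ih =>
    simp only [List.foldl_cons, List.map_cons, List.sum_cons]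
    by_cases h : (32 ≤ b ∧ b ≤ 126) ∨ b = 9 ∨ b = 10 ∨ b = 13
    · have hmem : (32 ≤ b ∧ b ≤ 126) ∨ b ∈ [(9:Int), 10, 13] := by
        rcases h with h | h | h | h <;> simp [h]
      rw [if_pos hmem, ih, pvWeight, if_pos h]; ring
    · have hmem : ¬((32 ≤ b ∧ b ≤ 126) ∨ b ∈ [(9:Int), 10, 13]) := by
        simpa [or_assoc] using h
      have hlt : b < 32 ∨ b > 126 := by omega
      rw [if_neg hmem, if_pos hlt, ih, pvWeight, if_neg h]; ring

lemma scoreB_acc (l : List (Int × Int)) (s : Int) :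
    l.foldl (fun score vc =>
      if (32 ≤ vc.1 ∧ vc.1 ≤ 126) ∨ vc.1 = 9 ∨ vc.1 = 10 ∨ vc.1 = 13 then score + vc.2
      else score - vc.2) s
    = s + (l.map (fun vc => pvWeight vc.1 * vc.2)).sum := by
  induction l generalizing s with
  | nil => simp
  | cons p t ih =>
    simp only [List.foldl_cons, List.map_cons, List.sum_cons]
    by_cases h : (32 ≤ p.1 ∧ p.1 ≤ 126) ∨ p.1 = 9 ∨ p.1 = 10 ∨ p.1 = 13
    · rw [if_pos h, ih, pvWeight, if_pos h]; ring
    · rw [if_neg h, ih, pvWeight, if_neg h]; ring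

lemma sum_if_eq (S : List Int) (b : Int) (hnd : S.Nodup) :
    (S.map (fun k => if k = b then pvWeight b else 0)).sum
      = if b ∈ S then pvWeight b else 0 := by
  induction S with
  | nil => simp
  | cons x t ih =>
    rcases List.nodup_cons.mp hnd with ⟨hx, ht⟩
    by_cases hxb : x = b
    · subst hxb
      simp [ih ht, hx]
    · simp [hxb, ih ht, Ne.symm hxb]

-- grouping a ±1 sum by value: sum over distinct values of weight·count = sum of weights
lemma grouped_sum (data S : List Int) (hnd : S.Nodup) (hsub : ∀ b ∈ data, b ∈ S) :
    (S.map (fun k => pvWeight k * (data.count k : Int))).sum = (data.map pvWeight).sum := by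
  induction data with
  | nil => simp
  | cons b t ih =>
    have hb : b ∈ S := hsub b (by simp)
    have hsub' : ∀ x ∈ t, x ∈ S := fun x hx => hsub x (by simp [hx])
    have hsplit : ∀ k : Int, pvWeight k * ((b :: t).count k : Int)
        = pvWeight k * (t.count k : Int) + (if k = b then pvWeight b else 0) := by
      intro k
      by_cases hk : k = b
      · subst hk; simp [List.count_cons_self]; ring
      · simp [hk, Ne.symm hk]
    calc (S.map (fun k => pvWeight k * ((b :: t).count k : Int))).sum
        = (S.map (fun k => pvWeight k * (t.count k : Int) + (if k = b then pvWeight b else 0))).sum := by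
          simp only [hsplit]
      _ = (S.map (fun k => pvWeight k * (t.count k : Int))).sum
            + (S.map (fun k => if k = b then pvWeight b else 0)).sum := by
          rw [← List.sum_map_add]
      _ = (t.map pvWeight).sum + pvWeight b := by
          rw [ih hsub', sum_if_eq S b hnd, if_pos hb]
      _ = ((b :: t).map pvWeight).sum := by simp; ring

-- ===== VERDICT (by name: the statement is the Claim_ definition above) =====
theorem get_PlainTextScore_spec : Claim_equal_get_PlainTextScore := by
  intro data _
  unfold Spec_get_PlainTextScore get_PlainTextScore get_PlainTextScore_alt
  rw [PySem.Dict.foldl_insert_getD_add_one_eq_counter, scoreA_acc, scoreB_acc,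
    PySem.Dict.items_counter]
  rw [List.map_map]
  have : ((fun vc : Int × Int => pvWeight vc.1 * vc.2) ∘ fun k => (k, (data.count k : Int)))
      = fun k => pvWeight k * (data.count k : Int) := rfl
  rw [this, grouped_sum data (PySem.Set.ofList data) (PySem.Set.nodup_ofList data)
    (fun b hb => (PySem.Set.mem_ofList data b).mpr hb)]
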